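-- pv_equiv track=rewrite | github.com/eliottcassidy2000/math | 04-computation/tournament_quiver_mutation.py | quiver_mutate
-- ===== SOURCE A (Python) =====
-- def quiver_mutate(adj, n, k):
--     """Perform quiver mutation at vertex k on a tournament.
--
--     Standard quiver mutation:
--     1. For each i->k->j path (2-path through k): add arrow i->j
--     2. Reverse all arrows incident to k
--     3. Remove 2-cycles
--
--     Returns the resulting digraph (may NOT be a tournament anymore).
--     """
--     # Copy
--     new_adj = [row[:] for row in adj]
--
--     # Step 1: Add arrows for 2-paths through k
--     for i in range(n):
--         if i == k:
--             continue
--         for j in range(n):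
--             if j == k or j == i:
--                 continue
--             if adj[i][k] and adj[k][j]:
--                 new_adj[i][j] += 1  # may create 2-cycle
--
--     # Step 2: Reverse all arrows incident to k
--     for i in range(n):
--         if i == k:
--             continue
--         old_ik = new_adj[i][k]
--         old_ki = new_adj[k][i]
--         new_adj[i][k] = old_ki
--         new_adj[k][i] = old_ik
--
--     # Step 3: Remove 2-cycles (cancel pairs)
--     for i in range(n):
--         for j in range(i+1, n):
--             # Remove min(a[i][j], a[j][i]) from both
--             cancel = min(new_adj[i][j], new_adj[j][i])
--             new_adj[i][j] -= cancel
--             new_adj[j][i] -= cancel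
--
--     return new_adj
-- ===== SOURCE B (Python) =====
-- def quiver_mutate(adj, n, k):
--     """Skew-representation algorithm: build the arrow-difference matrix
--     c[i][j] = adj[i][j] - adj[j][i], mutate it at k by the standard
--     exchange-matrix rule (negate row/column k, add the 2-path correction
--     elsewhere), and read off the reduced digraph as its positive part."""
--     c = [[adj[i][j] - adj[j][i] for j in range(n)] for i in range(n)]
--     new = [row[:] for row in adj]
--     for i in range(n):
--         for j in range(n):
--             if i == j:
--                 continue
--             if i == k or j == k:
--                 m = -c[i][j]
--             else:
--                 m = c[i][j] \
--                     + (1 if adj[i][k] and adj[k][j] else 0) \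
--                     - (1 if adj[j][k] and adj[k][i] else 0)
--             new[i][j] = max(m, 0)
--     return new
-- ===== Notes on version B (the rewrite author's own statement) =====
-- stated objective: alternative
-- what changed: A simulates the mutation operationally in three sequential sweeps over the multigraph matrix (add an arrow per 2-path through k, swap arrows incident to k, cancel 2-cycles); B changes representation: it builds the skew arrow-difference matrix c[i][j]=adj[i][j]-adj[j][i], mutates c at k by the standard exchange-matrix rule (negate entries in row/column k, add the 2-path correction elsewhere), and reads the reduced digraph off as the positive part of the mutated skew matrix.
-- outside the precondition, e.g. on quiver_mutate([[0, 2], [5, 0]], 1, 1): A returns [[0, 5], [2, 0]], B returns [[0, 2], [5, 0]]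
import Mathlib
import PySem

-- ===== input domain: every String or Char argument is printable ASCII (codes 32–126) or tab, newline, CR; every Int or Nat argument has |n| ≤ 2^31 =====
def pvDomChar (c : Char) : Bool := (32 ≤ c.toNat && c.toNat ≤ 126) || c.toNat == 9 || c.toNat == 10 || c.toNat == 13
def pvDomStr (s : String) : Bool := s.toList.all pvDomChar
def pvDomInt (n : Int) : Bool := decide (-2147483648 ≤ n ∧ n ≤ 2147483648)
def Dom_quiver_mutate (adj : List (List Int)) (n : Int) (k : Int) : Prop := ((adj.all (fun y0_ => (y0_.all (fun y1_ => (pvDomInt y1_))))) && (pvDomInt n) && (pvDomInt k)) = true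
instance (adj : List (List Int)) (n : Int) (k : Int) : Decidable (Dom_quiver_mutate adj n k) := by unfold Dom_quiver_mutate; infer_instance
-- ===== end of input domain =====

-- B replaces A's three operational sweeps by a change of representation: it mutates the skew
-- arrow-difference matrix c[i][j]=adj[i][j]-adj[j][i] by the exchange-matrix rule and returns
-- its positive part (objective: alternative algorithm, same asymptotic cost).


-- matrix read m[i][j] and write m[i][j] = v; exact for the in-range indices Pre_ admits
def pvG (m : List (List Int)) (i j : Nat) : Int := (m.getD i []).getD j 0
def pvS (m : List (List Int)) (i j : Nat) (v : Int) : List (List Int) :=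
  m.set i ((m.getD i []).set j v)

-- ===== PORT A =====
-- each Python loop is a named helper folding over its range; indices are Nats via k.toNat,
-- exact for the 0 ≤ k that Pre_ guarantees whenever the loops run.
-- new_adj = [row[:] for row in adj]:
def copyM (adj : List (List Int)) : List (List Int) := adj.map (fun row => row)
-- Step 1 inner loop 'for j in range(u)' (u = n at the call site), for a fixed i
def add2 (adj : List (List Int)) (kN i : Nat) (acc : List (List Int)) (u : Nat) : List (List Int) :=
  (List.range u).foldl (fun acc2 j =>
    if j = kN ∨ j = i then acc2
    else if pvG adj i kN ≠ 0 ∧ pvG adj kN j ≠ 0 then pvS acc2 i j (pvG acc2 i j + 1)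
    else acc2) acc
-- Step 1 outer loop 'for i in range(t)' (t = n at the call site)
def step1 (adj : List (List Int)) (kN nN : Nat) (acc : List (List Int)) (t : Nat) : List (List Int) :=
  (List.range t).foldl (fun acc i => if i = kN then acc else add2 adj kN i acc nN) acc
-- Step 2: 'for i in range(t)': swap entries (i,k) and (k,i)
def step2 (kN : Nat) (acc : List (List Int)) (t : Nat) : List (List Int) :=
  (List.range t).foldl (fun acc i =>
    if i = kN then acc
    else
      let old_ik := pvG acc i kN
      let old_ki := pvG acc kN i
      pvS (pvS acc i kN old_ki) kN i old_ik) acc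
-- Step 3 inner loop 'for j in range(i+1, u)', rendered as range(u) guarded by i < j
def canc (i : Nat) (acc : List (List Int)) (u : Nat) : List (List Int) :=
  (List.range u).foldl (fun acc2 j =>
    if i < j then
      let cancel := min (pvG acc2 i j) (pvG acc2 j i)
      pvS (pvS acc2 i j (pvG acc2 i j - cancel)) j i (pvG acc2 j i - cancel)
    else acc2) acc
-- Step 3 outer loop
def step3 (nN : Nat) (acc : List (List Int)) (t : Nat) : List (List Int) :=
  (List.range t).foldl (fun acc i => canc i acc nN) acc

def quiver_mutate (adj : List (List Int)) (n : Int) (k : Int) : List (List Int) :=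
  step3 n.toNat (step2 k.toNat (step1 adj k.toNat n.toNat (copyM adj) n.toNat) n.toNat) n.toNat

-- ===== PORT B =====
-- c = [[adj[i][j] - adj[j][i] for j in range(n)] for i in range(n)]
def skewC (adj : List (List Int)) (nN : Nat) : List (List Int) :=
  (List.range nN).map (fun i => (List.range nN).map (fun j => pvG adj i j - pvG adj j i))
-- the mutated skew-matrix entry m for the pair (i, j)
def mutB (adj c : List (List Int)) (kN i j : Nat) : Int :=
  if i = kN ∨ j = kN then -(pvG c i j)
  else pvG c i j + (if pvG adj i kN ≠ 0 ∧ pvG adj kN j ≠ 0 then 1 else 0)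
       - (if pvG adj j kN ≠ 0 ∧ pvG adj kN i ≠ 0 then 1 else 0)
-- inner loop 'for j in range(u)' writing new[i][j] = max(m, 0)
def rowFill (adj c : List (List Int)) (kN i : Nat) (acc : List (List Int)) (u : Nat) : List (List Int) :=
  (List.range u).foldl (fun acc2 j =>
    if i = j then acc2 else pvS acc2 i j (max (mutB adj c kN i j) 0)) acc
-- outer loop 'for i in range(t)'
def fillB (adj c : List (List Int)) (kN nN : Nat) (acc : List (List Int)) (t : Nat) : List (List Int) :=
  (List.range t).foldl (fun acc i => rowFill adj c kN i acc nN) acc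

def quiver_mutate_alt (adj : List (List Int)) (n : Int) (k : Int) : List (List Int) :=
  fillB adj (skewC adj n.toNat) k.toNat n.toNat (copyM adj) n.toNat

-- ===== PRECONDITION & SPEC =====
-- Pre_ restricts to the natural domain of quiver mutation: either n ≤ 0 (no vertices, identity)
-- or the mutation vertex k is an actual vertex 0 ≤ k < n and the matrix has at least n rows, the
-- first n of which have at least n columns; outside it A raises IndexError or, for a negative or
-- ≥ n vertex k, returns values produced by Python's accidental negative-index wraparound /
-- out-of-size-n indexing rather than by any mutation rule.
def Pre_quiver_mutate (adj : List (List Int)) (n : Int) (k : Int) : Prop :=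
  n ≤ 0 ∨ (0 ≤ k ∧ k < n ∧ n.toNat ≤ adj.length ∧
    ∀ row ∈ adj.take n.toNat, n.toNat ≤ row.length)
instance (adj : List (List Int)) (n : Int) (k : Int) : Decidable (Pre_quiver_mutate adj n k) := by
  unfold Pre_quiver_mutate; infer_instance

def pvWitness_quiver_mutate : List (List Int) × Int × Int := ([[0, 1, 0], [0, 0, 1], [1, 0, 0]], 3, 1)

def Spec_quiver_mutate (adj : List (List Int)) (n : Int) (k : Int) (out : List (List Int)) : Prop := out = quiver_mutate_alt adj n k
instance (adj : List (List Int)) (n : Int) (k : Int) (out : List (List Int)) : Decidable (Spec_quiver_mutate adj n k out) := by unfold Spec_quiver_mutate; infer_instance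

-- ===== CLAIM (what is proved, stated in full; the proofs are below) =====
def Claim_equal_quiver_mutate : Prop := ∀ (adj : List (List Int)) (n : Int) (k : Int), Dom_quiver_mutate adj n k → Pre_quiver_mutate adj n k → Spec_quiver_mutate adj n k (quiver_mutate adj n k)

-- ===== LEMMAS AND PROOFS =====

def Sh (adj m : List (List Int)) : Prop :=
  m.length = adj.length ∧ ∀ i, (m.getD i []).length = (adj.getD i []).length
def InR (adj : List (List Int)) (nN : Nat) : Prop :=
  nN ≤ adj.length ∧ ∀ i < nN, nN ≤ (adj.getD i []).length

lemma getD_set {α : Type} (l : List α) (a i : Nat) (x d : α) :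
    (l.set a x).getD i d = if a = i ∧ a < l.length then x else l.getD i d := by
  simp only [List.getD_eq_getElem?_getD, List.getElem?_set]
  split_ifs with h1 h2 h3 h4 <;> simp_all <;> omega

lemma pvS_rowlen (m : List (List Int)) (a b : Nat) (v : Int) (i : Nat) :
    ((pvS m a b v).getD i []).length = (m.getD i []).length := by
  unfold pvS
  rw [getD_set]
  split_ifs with h
  · obtain ⟨rfl, _⟩ := h; simp
  · rfl

lemma pvG_pvS (m : List (List Int)) (a b : Nat) (v : Int) (i j : Nat) :
    pvG (pvS m a b v) i j =
      if a = i ∧ b = j ∧ a < m.length ∧ b < (m.getD a []).length then v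
      else pvG m i j := by
  unfold pvG pvS
  rw [getD_set]
  split_ifs with h1 h2 h3
  · obtain ⟨rfl, hlen⟩ := h1
    rw [getD_set]
    exact if_pos ⟨h2.2.1, h2.2.2.2⟩
  · obtain ⟨rfl, hlen⟩ := h1
    rw [getD_set]
    have : ¬ (b = j ∧ b < (m.getD a []).length) := by tauto
    rw [if_neg this]
  · exact absurd ⟨h3.1, h3.2.2.1⟩ h1
  · rfl

lemma sh_pvS (adj m : List (List Int)) (a b : Nat) (v : Int) (h : Sh adj m) :
    Sh adj (pvS m a b v) :=
  ⟨by simpa [pvS] using h.1, fun i => (pvS_rowlen m a b v i).trans (h.2 i)⟩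

lemma pvG_pvS_in (adj : List (List Int)) (nN : Nat) (m : List (List Int)) (a b : Nat) (v : Int)
    (i j : Nat) (hsh : Sh adj m) (hr : InR adj nN) (ha : a < nN) (hb : b < nN) :
    pvG (pvS m a b v) i j = if a = i ∧ b = j then v else pvG m i j := by
  rw [pvG_pvS]
  have h1 : a < m.length := hsh.1 ▸ lt_of_lt_of_le ha hr.1
  have h2 : b < (m.getD a []).length := (hsh.2 a) ▸ lt_of_lt_of_le hb (hr.2 a ha)
  by_cases h : a = i ∧ b = j
  · rw [if_pos ⟨h.1, h.2, h1, h2⟩, if_pos h]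
  · rw [if_neg (by tauto), if_neg h]

lemma sh_foldl {α : Type} (adj : List (List Int)) (f : List (List Int) → α → List (List Int))
    (l : List α) (acc : List (List Int))
    (hf : ∀ m x, Sh adj m → Sh adj (f m x)) (h : Sh adj acc) : Sh adj (l.foldl f acc) := by
  induction l generalizing acc with
  | nil => exact h
  | cons x xs ih => exact ih _ (hf _ _ h)

lemma sh_add2 (adj : List (List Int)) (kN i : Nat) (acc : List (List Int)) (u : Nat)
    (h : Sh adj acc) : Sh adj (add2 adj kN i acc u) := by
  apply sh_foldl _ _ _ _ _ h
  intro m x hm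
  dsimp only
  split_ifs <;> [exact hm; exact sh_pvS _ _ _ _ _ hm; exact hm]

lemma sh_step1 (adj : List (List Int)) (kN nN : Nat) (acc : List (List Int)) (t : Nat)
    (h : Sh adj acc) : Sh adj (step1 adj kN nN acc t) := by
  apply sh_foldl _ _ _ _ _ h
  intro m x hm
  dsimp only
  split_ifs <;> [exact hm; exact sh_add2 _ _ _ _ _ hm]

lemma sh_step2 (adj : List (List Int)) (kN : Nat) (acc : List (List Int)) (t : Nat)
    (h : Sh adj acc) : Sh adj (step2 kN acc t) := by
  apply sh_foldl _ _ _ _ _ h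
  intro m x hm
  dsimp only
  split_ifs <;> [exact hm; exact sh_pvS _ _ _ _ _ (sh_pvS _ _ _ _ _ hm)]

lemma sh_canc (adj : List (List Int)) (i : Nat) (acc : List (List Int)) (u : Nat)
    (h : Sh adj acc) : Sh adj (canc i acc u) := by
  apply sh_foldl _ _ _ _ _ h
  intro m x hm
  dsimp only
  split_ifs <;> first | exact hm | exact sh_pvS _ _ _ _ _ (sh_pvS _ _ _ _ _ hm)

lemma sh_step3 (adj : List (List Int)) (nN : Nat) (acc : List (List Int)) (t : Nat)
    (h : Sh adj acc) : Sh adj (step3 nN acc t) := by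
  apply sh_foldl _ _ _ _ _ h
  intro m x hm
  exact sh_canc _ _ _ _ hm

lemma sh_rowFill (adj c : List (List Int)) (kN i : Nat) (acc : List (List Int)) (u : Nat)
    (h : Sh adj acc) : Sh adj (rowFill adj c kN i acc u) := by
  apply sh_foldl _ _ _ _ _ h
  intro m x hm
  dsimp only
  split_ifs <;> [exact hm; exact sh_pvS _ _ _ _ _ hm]

lemma sh_fillB (adj c : List (List Int)) (kN nN : Nat) (acc : List (List Int)) (t : Nat)
    (h : Sh adj acc) : Sh adj (fillB adj c kN nN acc t) := by
  apply sh_foldl _ _ _ _ _ h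
  intro m x hm
  exact sh_rowFill _ _ _ _ _ _ hm

lemma add2_succ (adj : List (List Int)) (kN i : Nat) (acc : List (List Int)) (u : Nat) :
    add2 adj kN i acc (u + 1) =
      (if u = kN ∨ u = i then add2 adj kN i acc u
       else if pvG adj i kN ≠ 0 ∧ pvG adj kN u ≠ 0 then
         pvS (add2 adj kN i acc u) i u (pvG (add2 adj kN i acc u) i u + 1)
       else add2 adj kN i acc u) := by
  unfold add2
  rw [List.range_succ, List.foldl_append, List.foldl_cons, List.foldl_nil]

lemma pvG_add2 (adj : List (List Int)) (nN kN i : Nat) (acc : List (List Int)) (u : Nat)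
    (hr : InR adj nN) (hsh : Sh adj acc) (hi : i < nN) (hu : u ≤ nN) :
    ∀ i' j', pvG (add2 adj kN i acc u) i' j' =
      if i' = i ∧ j' < u ∧ j' ≠ kN ∧ j' ≠ i ∧ pvG adj i kN ≠ 0 ∧ pvG adj kN j' ≠ 0
      then pvG acc i' j' + 1 else pvG acc i' j' := by
  induction u with
  | zero => intro i' j'; simp [add2]
  | succ u ih =>
    intro i' j'
    have hu' : u ≤ nN := Nat.le_of_succ_le hu
    rw [add2_succ]
    by_cases hg : u = kN ∨ u = i
    · rw [if_pos hg, ih hu']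
      split_ifs <;> omega
    · rw [if_neg hg]
      by_cases hc : pvG adj i kN ≠ 0 ∧ pvG adj kN u ≠ 0
      · rw [if_pos hc,
          pvG_pvS_in adj nN _ _ _ _ _ _ (sh_add2 adj kN i acc u hsh) hr hi (by omega)]
        by_cases hw : i = i' ∧ u = j'
        · obtain ⟨rfl, rfl⟩ := hw
          rw [if_pos ⟨rfl, rfl⟩, ih hu']
          split_ifs <;> omega
        · rw [if_neg hw, ih hu']
          split_ifs <;> omega
      · rw [if_neg hc, ih hu']
        by_cases hj : j' = u
        · subst hj; split_ifs <;> omega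
        · split_ifs <;> omega

lemma step1_succ (adj : List (List Int)) (kN nN : Nat) (acc : List (List Int)) (t : Nat) :
    step1 adj kN nN acc (t + 1) =
      (if t = kN then step1 adj kN nN acc t
       else add2 adj kN t (step1 adj kN nN acc t) nN) := by
  unfold step1
  rw [List.range_succ, List.foldl_append, List.foldl_cons, List.foldl_nil]

lemma pvG_step1 (adj : List (List Int)) (kN nN : Nat) (acc : List (List Int)) (t : Nat)
    (hr : InR adj nN) (hsh : Sh adj acc) (ht : t ≤ nN) :
    ∀ i' j', pvG (step1 adj kN nN acc t) i' j' =
      if i' < t ∧ i' ≠ kN ∧ j' < nN ∧ j' ≠ kN ∧ j' ≠ i' ∧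
         pvG adj i' kN ≠ 0 ∧ pvG adj kN j' ≠ 0
      then pvG acc i' j' + 1 else pvG acc i' j' := by
  induction t with
  | zero => intro i' j'; simp [step1]
  | succ t ih =>
    intro i' j'
    have ht' : t ≤ nN := Nat.le_of_succ_le ht
    rw [step1_succ]
    by_cases hg : t = kN
    · rw [if_pos hg, ih ht']
      split_ifs <;> omega
    · rw [if_neg hg,
        pvG_add2 adj nN kN t _ nN hr (sh_step1 adj kN nN acc t hsh) (by omega) le_rfl i' j',
        ih ht']
      by_cases hj : i' = t
      · subst hj; split_ifs <;> omega
      · split_ifs <;> omega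

lemma step2_succ (kN : Nat) (acc : List (List Int)) (t : Nat) :
    step2 kN acc (t + 1) =
      (if t = kN then step2 kN acc t
       else pvS (pvS (step2 kN acc t) t kN (pvG (step2 kN acc t) kN t)) kN t
              (pvG (step2 kN acc t) t kN)) := by
  unfold step2
  rw [List.range_succ, List.foldl_append, List.foldl_cons, List.foldl_nil]

lemma pvG_step2 (adj : List (List Int)) (kN nN : Nat) (acc : List (List Int)) (t : Nat)
    (hr : InR adj nN) (hsh : Sh adj acc) (hk : kN < nN) (ht : t ≤ nN) :
    ∀ i' j', pvG (step2 kN acc t) i' j' =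
      if i' < t ∧ i' ≠ kN ∧ j' = kN then pvG acc kN i'
      else if j' < t ∧ j' ≠ kN ∧ i' = kN then pvG acc j' kN
      else pvG acc i' j' := by
  induction t with
  | zero => intro i' j'; simp [step2]
  | succ t ih =>
    intro i' j'
    have ht' : t ≤ nN := Nat.le_of_succ_le ht
    have hsh' : Sh adj (step2 kN acc t) := sh_step2 adj kN acc t hsh
    rw [step2_succ]
    by_cases hg : t = kN
    · rw [if_pos hg, ih ht']
      split_ifs <;> omega
    · rw [if_neg hg,
        pvG_pvS_in adj nN _ _ _ _ _ _ (sh_pvS adj _ _ _ _ hsh') hr hk (by omega),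
        pvG_pvS_in adj nN _ _ _ _ _ _ hsh' hr (by omega) hk,
        ih ht', ih ht', ih ht']
      rcases eq_or_ne i' t with rfl | hi'
      · split_ifs <;> omega
      · rcases eq_or_ne j' t with rfl | hj'
        · split_ifs <;> omega
        · split_ifs <;> omega

lemma canc_succ (i : Nat) (acc : List (List Int)) (u : Nat) :
    canc i acc (u + 1) =
      (if i < u then
        pvS (pvS (canc i acc u) i u
              (pvG (canc i acc u) i u - min (pvG (canc i acc u) i u) (pvG (canc i acc u) u i)))
            u i
            (pvG (canc i acc u) u i - min (pvG (canc i acc u) i u) (pvG (canc i acc u) u i))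
       else canc i acc u) := by
  unfold canc
  rw [List.range_succ, List.foldl_append, List.foldl_cons, List.foldl_nil]

lemma pvG_canc (adj : List (List Int)) (nN i : Nat) (acc : List (List Int)) (u : Nat)
    (hr : InR adj nN) (hsh : Sh adj acc) (hi : i < nN) (hu : u ≤ nN) :
    ∀ i' j', pvG (canc i acc u) i' j' =
      if (i' = i ∧ i < j' ∧ j' < u) ∨ (j' = i ∧ i < i' ∧ i' < u)
      then pvG acc i' j' - min (pvG acc i' j') (pvG acc j' i')
      else pvG acc i' j' := by
  induction u with
  | zero => intro i' j'; simp [canc]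
  | succ u ih =>
    intro i' j'
    have hu' : u ≤ nN := Nat.le_of_succ_le hu
    have hsh' : Sh adj (canc i acc u) := sh_canc adj i acc u hsh
    rw [canc_succ]
    by_cases hg : i < u
    · rw [if_pos hg,
        pvG_pvS_in adj nN _ _ _ _ _ _ (sh_pvS adj _ _ _ _ hsh') hr (by omega) hi,
        pvG_pvS_in adj nN _ _ _ _ _ _ hsh' hr hi (by omega),
        ih hu', ih hu', ih hu']
      rcases eq_or_ne i' i with rfl | hi1
      · rcases eq_or_ne j' u with rfl | hj1
        · split_ifs <;> omega
        · split_ifs <;> omega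
      · rcases eq_or_ne i' u with rfl | hi2
        · rcases eq_or_ne j' i with rfl | hj2
          · split_ifs <;> omega
          · split_ifs <;> omega
        · split_ifs <;> omega
    · rw [if_neg hg, ih hu']
      split_ifs <;> omega

lemma step3_succ (nN : Nat) (acc : List (List Int)) (t : Nat) :
    step3 nN acc (t + 1) = canc t (step3 nN acc t) nN := by
  unfold step3
  rw [List.range_succ, List.foldl_append, List.foldl_cons, List.foldl_nil]

lemma pvG_step3 (adj : List (List Int)) (nN : Nat) (acc : List (List Int)) (t : Nat)
    (hr : InR adj nN) (hsh : Sh adj acc) (ht : t ≤ nN) :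
    ∀ i' j', pvG (step3 nN acc t) i' j' =
      if i' < nN ∧ j' < nN ∧ i' ≠ j' ∧ min i' j' < t
      then pvG acc i' j' - min (pvG acc i' j') (pvG acc j' i')
      else pvG acc i' j' := by
  induction t with
  | zero => intro i' j'; simp [step3]
  | succ t ih =>
    intro i' j'
    have ht' : t ≤ nN := Nat.le_of_succ_le ht
    rw [step3_succ,
      pvG_canc adj nN t _ nN hr (sh_step3 adj nN acc t hsh) (by omega) le_rfl i' j',
      ih ht', ih ht']
    by_cases hi1 : i' = t <;> by_cases hj1 : j' = t <;>
      (try rw [hi1]) <;> (try rw [hj1]) <;> split_ifs <;> omega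

-- the pair value the A-side pipeline holds at (i,j) just before cancellation
def Pv (adj : List (List Int)) (kN i j : Nat) : Int :=
  if i = kN ∨ j = kN then pvG adj j i
  else pvG adj i j + (if pvG adj i kN ≠ 0 ∧ pvG adj kN j ≠ 0 then 1 else 0)

lemma rowFill_succ (adj c : List (List Int)) (kN i : Nat) (acc : List (List Int)) (u : Nat) :
    rowFill adj c kN i acc (u + 1) =
      (if i = u then rowFill adj c kN i acc u
       else pvS (rowFill adj c kN i acc u) i u (max (mutB adj c kN i u) 0)) := by
  unfold rowFill
  rw [List.range_succ, List.foldl_append, List.foldl_cons, List.foldl_nil]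

lemma pvG_rowFill (adj c : List (List Int)) (nN kN i : Nat) (acc : List (List Int)) (u : Nat)
    (hr : InR adj nN) (hsh : Sh adj acc) (hi : i < nN) (hu : u ≤ nN) :
    ∀ i' j', pvG (rowFill adj c kN i acc u) i' j' =
      if i' = i ∧ j' < u ∧ j' ≠ i then max (mutB adj c kN i j') 0 else pvG acc i' j' := by
  induction u with
  | zero => intro i' j'; simp [rowFill]
  | succ u ih =>
    intro i' j'
    have hu' : u ≤ nN := Nat.le_of_succ_le hu
    rw [rowFill_succ]
    by_cases hg : i = u
    · rw [if_pos hg, ih hu']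
      split_ifs <;> omega
    · rw [if_neg hg,
        pvG_pvS_in adj nN _ _ _ _ _ _ (sh_rowFill adj c kN i acc u hsh) hr hi (by omega)]
      by_cases hw : i = i' ∧ u = j'
      · obtain ⟨rfl, rfl⟩ := hw
        rw [if_pos ⟨rfl, rfl⟩, if_pos ⟨rfl, by omega, by omega⟩]
      · rw [if_neg hw, ih hu']
        split_ifs <;> omega

lemma fillB_succ (adj c : List (List Int)) (kN nN : Nat) (acc : List (List Int)) (t : Nat) :
    fillB adj c kN nN acc (t + 1) = rowFill adj c kN t (fillB adj c kN nN acc t) nN := by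
  unfold fillB
  rw [List.range_succ, List.foldl_append, List.foldl_cons, List.foldl_nil]

lemma pvG_fillB (adj c : List (List Int)) (kN nN : Nat) (acc : List (List Int)) (t : Nat)
    (hr : InR adj nN) (hsh : Sh adj acc) (ht : t ≤ nN) :
    ∀ i' j', pvG (fillB adj c kN nN acc t) i' j' =
      if i' < t ∧ j' < nN ∧ j' ≠ i' then max (mutB adj c kN i' j') 0 else pvG acc i' j' := by
  induction t with
  | zero => intro i' j'; simp [fillB]
  | succ t ih =>
    intro i' j'
    have ht' : t ≤ nN := Nat.le_of_succ_le ht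
    rw [fillB_succ,
      pvG_rowFill adj c nN kN t _ nN hr (sh_fillB adj c kN nN acc t hsh) (by omega) le_rfl i' j',
      ih ht']
    by_cases hi1 : i' = t
    · subst hi1; split_ifs <;> omega
    · split_ifs <;> omega

lemma pvG_skewC (adj : List (List Int)) (nN i j : Nat) (hi : i < nN) (hj : j < nN) :
    pvG (skewC adj nN) i j = pvG adj i j - pvG adj j i := by
  unfold skewC pvG
  simp [List.getD_eq_getElem?_getD, List.getElem?_range, hi, hj]

lemma copyM_eq (adj : List (List Int)) : copyM adj = adj := by simp [copyM]

lemma sh_refl (adj : List (List Int)) : Sh adj adj := ⟨rfl, fun _ => rfl⟩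

lemma mat_ext (adj m1 m2 : List (List Int)) (h1 : Sh adj m1) (h2 : Sh adj m2)
    (hg : ∀ i j, pvG m1 i j = pvG m2 i j) : m1 = m2 := by
  have hlen : m1.length = m2.length := h1.1.trans h2.1.symm
  apply List.ext_getElem hlen
  intro i hi1 hi2
  have hrow : (m1.getD i []).length = (m2.getD i []).length := (h1.2 i).trans (h2.2 i).symm
  rw [List.getD_eq_getElem m1 [] hi1] at hrow
  rw [List.getD_eq_getElem m2 [] hi2] at hrow
  apply List.ext_getElem hrow
  intro j hj1 hj2
  have := hg i j
  unfold pvG at this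
  rw [List.getD_eq_getElem m1 [] hi1, List.getD_eq_getElem m2 [] hi2,
    List.getD_eq_getElem _ 0 hj1, List.getD_eq_getElem _ 0 hj2] at this
  exact this

lemma entry2 (adj : List (List Int)) (kN nN : Nat) (hr : InR adj nN) (hk : kN < nN)
    (hsh1 : Sh adj (step1 adj kN nN adj nN)) :
    ∀ i j, pvG (step2 kN (step1 adj kN nN adj nN) nN) i j =
      if i < nN ∧ j < nN ∧ i ≠ j then Pv adj kN i j else pvG adj i j := by
  intro i j
  rw [pvG_step2 adj kN nN _ nN hr hsh1 hk le_rfl i j]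
  simp only [pvG_step1 adj kN nN adj nN hr (sh_refl adj) le_rfl]
  unfold Pv
  by_cases hik : i = kN <;> by_cases hjk : j = kN <;>
    (try rw [hik]) <;> (try rw [hjk]) <;> split_ifs <;> omega

-- A's cancelled pair value equals the positive part of B's mutated skew entry
lemma mut_eq_pv (adj : List (List Int)) (kN nN i j : Nat) (hi : i < nN) (hj : j < nN)
    (hij : i ≠ j) :
    max (mutB adj (skewC adj nN) kN i j) 0 =
      Pv adj kN i j - min (Pv adj kN i j) (Pv adj kN j i) := by
  unfold mutB Pv
  rw [pvG_skewC adj nN i j hi hj]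
  by_cases hk : i = kN ∨ j = kN
  · rw [if_pos hk, if_pos hk, if_pos (Or.symm hk)]
    omega
  · rw [if_neg hk, if_neg hk, if_neg (fun h => hk (Or.symm h))]
    split_ifs <;> omega

lemma quiver_mutate_eq_alt (adj : List (List Int)) (n : Int) (k : Int)
    (hpre : Pre_quiver_mutate adj n k) :
    quiver_mutate adj n k = quiver_mutate_alt adj n k := by
  rcases hpre with hn | ⟨hk0, hkn, hlen, hrows⟩
  · have h0 : n.toNat = 0 := Int.toNat_of_nonpos hn
    simp [quiver_mutate, quiver_mutate_alt, step3, step2, step1, fillB, h0]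
  · unfold quiver_mutate quiver_mutate_alt
    rw [copyM_eq]
    set nN := n.toNat with hnN
    set kN := k.toNat with hkN
    have hk : kN < nN := by omega
    have hr : InR adj nN := by
      refine ⟨hlen, fun i hi => ?_⟩
      have hmem : adj.getD i [] ∈ adj.take nN := by
        rw [List.getD_eq_getElem adj [] (by omega)]
        exact List.mem_take_iff_getElem.mpr ⟨i, by omega, by simp⟩
      exact hrows _ hmem
    have hsh1 : Sh adj (step1 adj kN nN adj nN) := sh_step1 _ _ _ _ _ (sh_refl adj)
    have hsh2 : Sh adj (step2 kN (step1 adj kN nN adj nN) nN) := sh_step2 _ _ _ _ hsh1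
    apply mat_ext adj
    · exact sh_step3 _ _ _ _ hsh2
    · exact sh_fillB _ _ _ _ _ _ (sh_refl adj)
    · intro i j
      rw [pvG_step3 adj nN _ nN hr hsh2 le_rfl i j,
        pvG_fillB adj (skewC adj nN) kN nN adj nN hr (sh_refl adj) le_rfl i j,
        entry2 adj kN nN hr hk hsh1 i j, entry2 adj kN nN hr hk hsh1 j i]
      by_cases hc : i < nN ∧ j < nN ∧ i ≠ j
      · obtain ⟨hi, hj, hij⟩ := hc
        rw [mut_eq_pv adj kN nN i j hi hj hij]
        split_ifs <;> omega
      · split_ifs <;> omega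

-- ===== VERDICT (by name: the statement is the Claim_ definition above) =====
theorem quiver_mutate_spec : Claim_equal_quiver_mutate := by
  intro adj n k _ hpre
  exact quiver_mutate_eq_alt adj n k hpre
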